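-- pv_equiv track=rewrite | github.com/UNKNOWNAR/PythonProgram | pythonProject/Code/TrainStationHop.py | OneHop
-- ===== SOURCE A (Python) =====
-- def OneHop(dict):
--     n = len(dict)
--     onehop = [[0 for _ in range(n)] for _ in range(n)]
--     for i in range(n):
--         for j in range(n):
--             onehop[i][j] = dict[i][j]
--             for k in range(n):
--                 if dict[i][k] ==1 and dict[k][j]==1:
--                    onehop[i][j] = 1
--     return onehop
-- ===== SOURCE B (Python) =====
-- def OneHop(dict):
--     n = len(dict)
--     # bitmask per row: bit j set iff row[j] == 1
--     rowmask = []
--     for row in dict: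
--         m = 0
--         for j in range(n):
--             if row[j] == 1:
--                 m |= 1 << j
--         rowmask.append(m)
--     result = []
--     for row in dict:
--         m = 0
--         for k in range(n):
--             if row[k] == 1:
--                 m |= rowmask[k]
--         result.append([1 if (m >> j) & 1 else row[j] for j in range(n)])
--     return result
-- ===== Notes on version B (the rewrite author's own statement) =====
-- stated objective: faster
-- what changed: Replaces the O(n^3) per-cell triple loop by a bitset algorithm: each row is packed into an integer bitmask once, each output row's reachability mask is the OR of the neighbour rows' masks, and cells are read off the mask bits.
import Mathlib
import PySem

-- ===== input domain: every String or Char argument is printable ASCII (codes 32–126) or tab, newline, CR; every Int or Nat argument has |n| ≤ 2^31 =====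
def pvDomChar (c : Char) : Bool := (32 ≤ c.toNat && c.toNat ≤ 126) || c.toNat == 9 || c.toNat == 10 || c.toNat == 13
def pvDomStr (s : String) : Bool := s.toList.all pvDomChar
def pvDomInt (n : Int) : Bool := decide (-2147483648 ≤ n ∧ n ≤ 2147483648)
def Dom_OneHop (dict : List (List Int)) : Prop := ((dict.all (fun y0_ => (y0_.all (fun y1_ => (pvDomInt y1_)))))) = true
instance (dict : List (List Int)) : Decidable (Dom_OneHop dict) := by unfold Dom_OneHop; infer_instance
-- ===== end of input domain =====

-- B replaces A's cubic triple loop by bitset row unions: each row is packed once into an integer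
-- bitmask, each output row's mask is the OR of its 1-neighbours' masks, cells are read off the bits.

-- ===== PORT A =====
-- Literal port of A's triple loop. Python's onehop matrix is written only at cell (i,j) inside the
-- (i,j) iteration, so the in-place writes collapse to a per-cell fold over k with the same if and the
-- same initial assignment onehop[i][j] = dict[i][j]. dict[x][y] is ported as pyGetD (in range under Pre_).
def OneHop (dict : List (List Int)) : List (List Int) :=
  let n : Int := dict.length
  (PySem.List.pyRange 0 n 1).map (fun i =>
    (PySem.List.pyRange 0 n 1).map (fun j =>
      (PySem.List.pyRange 0 n 1).foldl
        (fun v k =>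
          if PySem.List.pyGetD (PySem.List.pyGetD dict i []) k 0 = 1 ∧
             PySem.List.pyGetD (PySem.List.pyGetD dict k []) j 0 = 1
          then 1 else v)
        (PySem.List.pyGetD (PySem.List.pyGetD dict i []) j 0)))

-- ===== PORT B =====
-- Literal port of Source B: first loop packs each row into a Nat bitmask (bit j set iff row[j] == 1);
-- second loop ORs the masks of the 1-neighbours of each row and reads the cells off the mask bits.
def OneHop_alt (dict : List (List Int)) : List (List Int) :=
  let n := dict.length
  let rowmask : List Nat := dict.foldl
    (fun (acc : List Nat) (row : List Int) => acc ++
      [(List.range n).foldl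
        (fun (m j : Nat) => if PySem.List.pyGetD row (j : Int) 0 = 1 then m ||| (1 <<< j) else m) 0]) []
  dict.foldl
    (fun res row =>
      let m := (List.range n).foldl
        (fun (m k : Nat) => if PySem.List.pyGetD row (k : Int) 0 = 1 then m ||| rowmask.getD k 0 else m) 0
      res ++
      [(List.range n).map
        (fun (j : Nat) => if (m >>> j) &&& 1 = 1 then (1 : Int) else PySem.List.pyGetD row (j : Int) 0)]) []

-- ===== PRECONDITION & SPEC =====
-- Pre_ excludes ragged inputs (some row shorter than the number of rows), on which Python A raises IndexError.
def Pre_OneHop (dict : List (List Int)) : Prop := ∀ row ∈ dict, dict.length ≤ row.length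
instance (dict : List (List Int)) : Decidable (Pre_OneHop dict) := by unfold Pre_OneHop; infer_instance
def pvWitness_OneHop : List (List Int) := [[0, 1], [1, 0]]

def Spec_OneHop (dict : List (List Int)) (out : List (List Int)) : Prop := out = OneHop_alt dict
instance (dict : List (List Int)) (out : List (List Int)) : Decidable (Spec_OneHop dict out) := by unfold Spec_OneHop; infer_instance

-- ===== CLAIM (what is proved, stated in full; the proofs are below) =====
def Claim_equal_OneHop : Prop := ∀ (dict : List (List Int)), Dom_OneHop dict → Pre_OneHop dict → Spec_OneHop dict (OneHop dict)

-- ===== LEMMAS AND PROOFS =====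

-- testBit of an OR-accumulating fold over range n
theorem testBit_orFold (P : Nat → Prop) [DecidablePred P] (g : Nat → Nat) (n t acc : Nat) :
    ((List.range n).foldl (fun a j => if P j then a ||| g j else a) acc).testBit t
      = (acc.testBit t || (List.range n).any (fun j => decide (P j) && (g j).testBit t)) := by
  induction n generalizing acc with
  | zero => simp
  | succ n ih =>
      rw [List.range_succ, List.foldl_append, List.any_append]
      by_cases h : P n <;>
        simp [h, ih, Nat.testBit_or, Bool.or_assoc]

-- A's inner k-loop: sets the cell to 1 iff some k in the list satisfies the condition
theorem foldl_set_one (C : Int → Prop) [DecidablePred C] (l : List Int) (init : Int) :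
    l.foldl (fun v k => if C k then (1 : Int) else v) init
      = if l.any (fun k => decide (C k)) then 1 else init := by
  induction l generalizing init with
  | nil => simp
  | cons a l ih => by_cases h : C a <;> simp [h, ih]

theorem testBit_one_shiftLeft (j t : Nat) : (1 <<< j).testBit t = decide (j = t) := by
  rw [Nat.one_shiftLeft]; exact Nat.testBit_two_pow

theorem and_one_eq_testBit (m j : Nat) : ((m >>> j) &&& 1 = 1) ↔ m.testBit j = true := by
  rw [Nat.testBit]; simp [Nat.and_comm, Nat.and_one_is_mod]

-- A's k-loop condition, as an existential over Nat indices
theorem aCond (dict : List (List Int)) (row : List Int) (j : Int) :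
    ((PySem.List.pyRange 0 (dict.length : Int) 1).any
        (fun k => decide (PySem.List.pyGetD row k 0 = 1 ∧
          PySem.List.pyGetD (PySem.List.pyGetD dict k []) j 0 = 1)) = true)
      ↔ ∃ k : Nat, k < dict.length ∧ PySem.List.pyGetD row (k : Int) 0 = 1 ∧
          PySem.List.pyGetD (dict.getD k []) j 0 = 1 := by
  simp only [List.any_eq_true, PySem.List.mem_pyRange_one, decide_eq_true_eq]
  constructor
  · rintro ⟨x, ⟨hx0, hxn⟩, h1, h2⟩
    rw [← Int.toNat_of_nonneg hx0, PySem.List.pyGetD_natCast] at h2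
    rw [← Int.toNat_of_nonneg hx0] at h1
    exact ⟨x.toNat, by omega, h1, h2⟩
  · rintro ⟨k, hk, h1, h2⟩
    refine ⟨(k : Int), ⟨Int.natCast_nonneg k, by exact_mod_cast hk⟩, h1, ?_⟩
    rw [PySem.List.pyGetD_natCast]; exact h2

-- B's bit test on the OR of neighbour masks, as the same existential
theorem bCond (dict : List (List Int)) (row : List Int) (j : Nat) (hj : j < dict.length) :
    ((((List.range dict.length).foldl
        (fun (m k : Nat) => if PySem.List.pyGetD row (k : Int) 0 = 1
          then m ||| ((dict.map (fun (r : List Int) => (List.range dict.length).foldl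
            (fun (m t : Nat) => if PySem.List.pyGetD r (t : Int) 0 = 1 then m ||| (1 <<< t) else m) 0)).getD k 0)
          else m) 0) >>> j) &&& 1 = 1)
      ↔ ∃ k : Nat, k < dict.length ∧ PySem.List.pyGetD row (k : Int) 0 = 1 ∧
          PySem.List.pyGetD (dict.getD k []) (j : Int) 0 = 1 := by
  rw [and_one_eq_testBit, testBit_orFold]
  simp only [Nat.zero_testBit, Bool.false_or, List.any_eq_true, List.mem_range,
    decide_eq_true_eq, Bool.and_eq_true]
  refine exists_congr fun k => ?_
  constructor
  · rintro ⟨hk, h1, hbit⟩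
    refine ⟨hk, h1, ?_⟩
    rw [List.getD_eq_getElem _ _ (by simpa using hk), List.getElem_map] at hbit
    rw [testBit_orFold] at hbit
    simp only [Nat.zero_testBit, Bool.false_or, List.any_eq_true, List.mem_range,
      testBit_one_shiftLeft, decide_eq_true_eq, Bool.and_eq_true] at hbit
    obtain ⟨t, ht, hp, rfl⟩ := hbit
    rwa [List.getD_eq_getElem _ _ hk]
  · rintro ⟨hk, h1, h2⟩
    refine ⟨hk, h1, ?_⟩
    rw [List.getD_eq_getElem _ _ (by simpa using hk), List.getElem_map]
    rw [testBit_orFold]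
    simp only [Nat.zero_testBit, Bool.false_or, List.any_eq_true, List.mem_range,
      testBit_one_shiftLeft, decide_eq_true_eq, Bool.and_eq_true]
    refine ⟨j, hj, ?_, rfl⟩
    rwa [List.getD_eq_getElem _ _ hk] at h2

-- ===== VERDICT (by name: the statement is the Claim_ definition above) =====
theorem OneHop_spec : Claim_equal_OneHop := by
  intro dict _ _
  unfold Spec_OneHop OneHop OneHop_alt
  simp only [PySem.List.foldl_append_singleton_eq_map, List.nil_append]
  apply List.ext_getElem
  · simp only [List.length_map, PySem.List.length_pyRange_one]; omega
  intro i hiA hiB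
  have hi : i < dict.length := by simpa using hiB
  simp only [List.getElem_map, PySem.List.getElem_pyRange_one, zero_add]
  apply List.ext_getElem
  · simp only [List.length_map, PySem.List.length_pyRange_one, List.length_range]; omega
  intro j hjA hjB
  have hj : j < dict.length := by simpa using hjB
  simp only [List.getElem_map, PySem.List.getElem_pyRange_one, List.getElem_range, zero_add]
  rw [PySem.List.pyGetD_natCast dict i [], List.getD_eq_getElem dict [] hi]
  rw [foldl_set_one]
  rw [if_congr ((aCond dict dict[i] (j : Int)).trans ((bCond dict dict[i] j hj).symm)) rfl rfl]
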